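-- pv_equiv track=rewrite | github.com/AIGUL2/2019-2-level-labs | lab_3/main.py | split_by_sentence
-- ===== SOURCE A (Python) =====
-- def split_by_sentence(text: str) -> list:
--     mat = []
--
--     bad_chars = ["'", '$', '#', '&', '%', '^', '*', '(', ')', '@', ',']
--     if text is not None:
--         for ch in bad_chars:
--             text = text.replace(ch, '')
--
--     if text is None or text == '' or text.find('.') == -1:
--         return mat
--     text = text.replace('!', '.').replace('?', '.').split('\n')
--     for ind in range(len(text)):
--         sents = text[ind].split('.')
--         for i in range(len(sents)):
--             words = sents[i].split()
--             if len(words) > 0: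
--                 if words[0][0].islower():
--                     sent_list = mat[-1]
--                     for word in words:
--                         sent_list.insert(-1, word.lower())
--                 else:
--                     sent_list = ['<s>']
--                     for word in words:
--                         sent_list.append(word.lower())
--                     sent_list.append('</s>')
--                     mat.append(sent_list)
--     return mat
-- ===== SOURCE B (Python) =====
-- def split_by_sentence(text):
--     if text is not None:
--         for ch in ["'", '$', '#', '&', '%', '^', '*', '(', ')', '@', ',']:
--             text = text.replace(ch, '')
--     if text is None or text == '' or '.' not in text:
--         return []
--     flat = []    # every word of the text, lowercased, in order
--     starts = []  # indices into flat where a new sentence begins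
--     for line in text.replace('!', '.').replace('?', '.').split('\n'):
--         for seg in line.split('.'):
--             words = seg.split()
--             if words:
--                 if not words[0][0].islower():
--                     starts.append(len(flat))
--                 flat.extend(w.lower() for w in words)
--     bounds = starts + [len(flat)]
--     return [['<s>'] + flat[a:b] + ['</s>'] for a, b in zip(bounds, bounds[1:])]
-- ===== Notes on version B (the rewrite author's own statement) =====
-- stated objective: alternative
-- what changed: A builds each tagged sentence list eagerly during the scan (appending ['<s>']..['</s>'] and merging lowercase-start segments by repeated list.insert(-1, w) into mat[-1] inside index-based loops); B instead records all lowercased words in one flat array plus a list of sentence-start indices, and reconstructs the tagged sentences afterwards by slicing the flat array between consecutive boundary indices.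
-- outside the precondition, e.g. on split_by_sentence('ab. C d.'): A raises IndexError, B returns [['<s>', 'c', 'd', '</s>']]
import Mathlib
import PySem

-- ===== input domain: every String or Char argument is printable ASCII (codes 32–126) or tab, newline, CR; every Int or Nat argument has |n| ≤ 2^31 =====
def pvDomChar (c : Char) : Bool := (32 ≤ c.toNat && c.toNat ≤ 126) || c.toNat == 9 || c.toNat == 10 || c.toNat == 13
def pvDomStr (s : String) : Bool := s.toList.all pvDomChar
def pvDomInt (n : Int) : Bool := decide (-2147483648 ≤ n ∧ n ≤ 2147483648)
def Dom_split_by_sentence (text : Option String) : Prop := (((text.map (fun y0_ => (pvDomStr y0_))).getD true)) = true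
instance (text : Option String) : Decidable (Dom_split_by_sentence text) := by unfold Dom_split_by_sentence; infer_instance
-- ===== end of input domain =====

-- B replaces A's eager per-sentence tagged lists (grown by list.insert(-1, ·) / appended in
-- index-based loops) with one flat array of lowercased words plus a list of sentence-start
-- indices, and reconstructs the sentences at the end by slicing between consecutive bounds;
-- same cost, a different data organisation (objective: alternative).


-- ===== PORT A =====
-- helpers shared by both ports (both Pythons perform these identical preprocessing steps)
def pvBadChars : List String := ["'", "$", "#", "&", "%", "^", "*", "(", ")", "@", ","]

-- for ch in bad_chars: text = text.replace(ch, '')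
def pvClean (t : String) : String := pvBadChars.foldl (fun s c => PySem.Str.replace s c "") t

-- text.replace('!', '.').replace('?', '.')
def pvPrep (t : String) : String := PySem.Str.replace (PySem.Str.replace t "!" ".") "?" "."

-- words[0][0].islower()
def pvStartsLower (words : List String) : Bool :=
  ((PySem.Str.pyGet? ((PySem.List.pyGet? words 0).getD "") 0).map PySem.Chars.islower).getD false

-- body of A's inner loop over one sentence segment (Python mutates mat's last element in
-- place through the alias sent_list; the lowercase branch writes the list back into the
-- last slot; mat[-1] raises IndexError on an empty mat, which Pre_ excludes)
def pvStepA (mat : List (List String)) (seg : String) : List (List String) :=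
  let words := PySem.Str.split₀ seg
  if words.length > 0 then
    if pvStartsLower words then
      let sl := PySem.List.pyGetD mat (-1) []
      let sl := words.foldl (fun l w => PySem.List.insert l (-1) (PySem.Str.lower w)) sl
      mat.dropLast ++ [sl]
    else
      let sl := ["<s>"]
      let sl := words.foldl (fun l w => l ++ [PySem.Str.lower w]) sl
      let sl := sl ++ ["</s>"]
      mat ++ [sl]
  else mat

-- body of A's outer loop over one line: sents = text[ind].split('.'); for i in range(len(sents)): …
def pvLineA (mat : List (List String)) (line : String) : List (List String) :=
  let sents := (PySem.Str.split? line ".").getD []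
  (PySem.List.pyRange 0 (sents.length : Int)).foldl
    (fun mat i => pvStepA mat (PySem.List.pyGetD sents i "")) mat

def split_by_sentence (text : Option String) : List (List String) :=
  let mat : List (List String) := []
  match text with
  | none => mat
  | some t0 =>
    let t := pvClean t0
    if t = "" ∨ PySem.Str.find t "." = -1 then mat
    else
      let lines := (PySem.Str.split? (pvPrep t) "\n").getD []
      (PySem.List.pyRange 0 (lines.length : Int)).foldl
        (fun mat ind => pvLineA mat (PySem.List.pyGetD lines ind "")) mat

-- ===== PORT B =====
-- B's scan over one segment: extend the flat word array, recording where sentences start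
def pvScanB (st : List String × List Nat) (seg : String) : List String × List Nat :=
  let words := PySem.Str.split₀ seg
  if words ≠ [] then
    let starts := if pvStartsLower words = false then st.2 ++ [st.1.length] else st.2
    (st.1 ++ words.map PySem.Str.lower, starts)
  else st

def split_by_sentence_alt (text : Option String) : List (List String) :=
  match text with
  | none => []
  | some t0 =>
    let t := pvClean t0
    if t = "" ∨ PySem.Str.isIn "." t = false then []
    else
      let st := ((PySem.Str.split? (pvPrep t) "\n").getD []).foldl
        (fun acc line => ((PySem.Str.split? line ".").getD []).foldl pvScanB acc) ([], [])
      let bounds := st.2 ++ [st.1.length]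
      (bounds.zip bounds.tail).map
        (fun ab => ["<s>"] ++ PySem.List.slice st.1 (some (ab.1 : Int)) (some (ab.2 : Int)) ++ ["</s>"])

-- ===== PRECONDITION & SPEC =====
-- all sentence segments of the cleaned text, in processing order
def pvSegsAll (t : String) : List String :=
  ((PySem.Str.split? (pvPrep (pvClean t)) "\n").getD []).flatMap
    (fun line => (PySem.Str.split? line ".").getD [])

-- the first segment with any words must not start with a lowercase letter
def pvFirstOK : List String → Bool
  | [] => true
  | s :: rest =>
    match PySem.Str.split₀ s with
    | [] => pvFirstOK rest
    | _ :: _ => !pvStartsLower (PySem.Str.split₀ s)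

def pvPreB : Option String → Bool
  | none => true
  | some t =>
    (pvClean t == "") || (PySem.Str.find (pvClean t) "." == -1) || pvFirstOK (pvSegsAll t)

-- Pre_ excludes exactly the inputs on which A raises IndexError (the first sentence segment
-- of the cleaned text starts with a lowercase letter, so mat[-1] is read from an empty list).
def Pre_split_by_sentence (text : Option String) : Prop := pvPreB text = true
instance (text : Option String) : Decidable (Pre_split_by_sentence text) := by unfold Pre_split_by_sentence; infer_instance

def pvWitness_split_by_sentence : Option String := none

def Spec_split_by_sentence (text : Option String) (out : List (List String)) : Prop := out = split_by_sentence_alt text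
instance (text : Option String) (out : List (List String)) : Decidable (Spec_split_by_sentence text out) := by unfold Spec_split_by_sentence; infer_instance

-- ===== CLAIM (what is proved, stated in full; the proofs are below) =====
def Claim_equal_split_by_sentence : Prop := ∀ (text : Option String), Dom_split_by_sentence text → Pre_split_by_sentence text → Spec_split_by_sentence text (split_by_sentence text)

-- ===== LEMMAS AND PROOFS =====
def pvTag (s : List String) : List String := ["<s>"] ++ s ++ ["</s>"]

-- the sentences described by a flat word array and a list of start indices
def pvGroupAt (flat : List String) : List Nat → List (List String)
  | [] => []
  | [a] => [pvTag (flat.drop a)]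
  | a :: b :: rest => pvTag ((flat.drop a).take (b - a)) :: pvGroupAt flat (b :: rest)

theorem pv_insert_last' (a : String) (u : List String) (e x : String) :
    PySem.List.insert (a :: (u ++ [e])) (-1) x = a :: (u ++ [x, e]) := by
  simp only [PySem.List.insert, PySem.List.sliceIndices]
  norm_num
  rw [show (max ((u.length : Int) + 1) 0).toNat = u.length + 1 by omega]
  rw [show a :: (u ++ [e]) = (a :: u) ++ [e] by simp]
  rw [List.take_append_of_le_length (by simp), List.drop_append_of_le_length (by simp)]
  simp

theorem pv_flatten_singleton (f : String → String) (l : List String) :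
    (l.map (fun x => [f x])).flatten = l.map f := by
  induction l <;> simp_all

theorem pv_fold_insert2 (ws : List String) (u : List String) :
    ws.foldl (fun l w => PySem.List.insert l (-1) (PySem.Str.lower w)) ("<s>" :: (u ++ ["</s>"])) =
      "<s>" :: ((u ++ ws.map PySem.Str.lower) ++ ["</s>"]) := by
  induction ws generalizing u with
  | nil => simp
  | cons w ws ih =>
    rw [List.foldl_cons, pv_insert_last']
    have h2 : (u ++ [PySem.Str.lower w, "</s>"]) = (u ++ [PySem.Str.lower w]) ++ ["</s>"] := by
      simp
    rw [h2, ih]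
    simp

theorem pv_groupAt_ne_nil (flat : List String) (starts : List Nat) (h : starts ≠ []) :
    pvGroupAt flat starts ≠ [] := by
  match starts with
  | [] => exact absurd rfl h
  | [a] => simp [pvGroupAt]
  | a :: b :: rest => simp [pvGroupAt]

-- appending a new sentence: start index = old length, new words appended to flat
theorem pv_groupAt_append_start (flat ext : List String) (starts : List Nat)
    (hb : ∀ s ∈ starts, s ≤ flat.length) :
    pvGroupAt (flat ++ ext) (starts ++ [flat.length]) =
      pvGroupAt flat starts ++ [pvTag ext] := by
  induction starts with
  | nil => simp [pvGroupAt]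
  | cons a rest ih =>
    match rest with
    | [] =>
      have ha : a ≤ flat.length := hb a (by simp)
      simp only [List.cons_append, List.nil_append, pvGroupAt]
      rw [List.drop_append_of_le_length ha, List.drop_append_of_le_length (le_refl _)]
      simp only [List.drop_length, List.nil_append]
      have hlen : (flat.drop a).length = flat.length - a := by simp
      rw [List.take_append_of_le_length (by omega)]
      rw [List.take_of_length_le (by omega)]
    | b :: rest' =>
      have hab : b ≤ flat.length := hb b (by simp)
      simp only [List.cons_append, pvGroupAt]
      have ih' := ih (fun s hs => hb s (by simp [hs]))
      simp only [List.cons_append] at ih'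
      rw [ih']
      congr 2
      rw [List.drop_append_of_le_length (hb a (by simp))]
      rw [List.take_append_of_le_length (by simp; omega)]

-- extending the last sentence: flat grows, starts unchanged
theorem pv_groupAt_extend_last (flat ext : List String) (starts : List Nat)
    (hne : starts ≠ []) (hb : ∀ s ∈ starts, s ≤ flat.length) :
    pvGroupAt (flat ++ ext) starts =
      (pvGroupAt flat starts).dropLast ++ [pvTag (flat.drop (starts.getLast hne) ++ ext)] := by
  induction starts with
  | nil => exact absurd rfl hne
  | cons a rest ih =>
    match rest with
    | [] =>
      simp only [pvGroupAt, List.getLast_singleton]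
      rw [List.drop_append_of_le_length (hb a (by simp))]
      simp
    | b :: rest' =>
      have hbr : (b :: rest') ≠ [] := by simp
      simp only [pvGroupAt]
      rw [ih hbr (fun s hs => hb s (by simp [hs]))]
      have hgne := pv_groupAt_ne_nil flat (b :: rest') hbr
      rw [List.getLast_cons hbr]
      match hG : pvGroupAt flat (b :: rest') with
      | [] => exact absurd hG hgne
      | g :: gs =>
        simp only [List.dropLast_cons_of_ne_nil (by simp : (g :: gs) ≠ []), List.cons_append]
        congr 2
        rw [List.drop_append_of_le_length (hb a (by simp))]
        rw [List.take_append_of_le_length (by simp; have := hb b (by simp); omega)]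

-- core step lemma: A's step tracks B's scan through the groupAt abstraction
theorem pv_step_comm (flat : List String) (starts : List Nat) (seg : String)
    (hb : ∀ s ∈ starts, s ≤ flat.length)
    (h : starts ≠ [] ∨ pvStartsLower (PySem.Str.split₀ seg) = false) :
    pvStepA (pvGroupAt flat starts) seg =
      pvGroupAt (pvScanB (flat, starts) seg).1 (pvScanB (flat, starts) seg).2 := by
  unfold pvStepA pvScanB
  cases hw : PySem.Str.split₀ seg with
  | nil => simp
  | cons w ws =>
    simp only [hw]
    by_cases hlow : pvStartsLower (w :: ws) = true
    · have hs : starts ≠ [] := by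
        rcases h with hs | hf
        · exact hs
        · rw [hw] at hf; rw [hlow] at hf; cases hf
      have hmne := pv_groupAt_ne_nil flat starts hs
      obtain ⟨u, e, hue⟩ : ∃ u e, pvGroupAt flat starts = u ++ [e] :=
        ⟨(pvGroupAt flat starts).dropLast, (pvGroupAt flat starts).getLast hmne,
          (List.dropLast_append_getLast hmne).symm⟩
      have hget : PySem.List.pyGetD (pvGroupAt flat starts) (-1) ([] : List String) = e := by
        rw [hue]; exact PySem.List.pyGetD_neg_one_append_singleton _ _ _
      have hlast : e = pvTag (flat.drop (starts.getLast hs)) := by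
        have := pv_groupAt_extend_last flat [] starts hs hb
        simp only [List.append_nil] at this
        rw [hue] at this
        have h2 := congrArg (·.getLast?) this
        simp at h2
        exact h2
      simp only [hlow, if_pos, List.length_cons, Nat.succ_pos, ne_eq, reduceCtorEq,
        not_false_eq_true, if_neg, Bool.true_eq_false]
      rw [hget, hlast]
      rw [show pvTag (flat.drop (starts.getLast hs)) =
        "<s>" :: ((flat.drop (starts.getLast hs)) ++ ["</s>"]) from rfl]
      rw [pv_fold_insert2 (w :: ws) _]
      rw [pv_groupAt_extend_last flat ((w :: ws).map PySem.Str.lower) starts hs hb]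
      rw [hue]
      simp [pvTag]
    · have hlow' : pvStartsLower (w :: ws) = false := by
        cases hx : pvStartsLower (w :: ws)
        · rfl
        · exact absurd hx hlow
      simp only [hlow', List.length_cons, Nat.succ_pos, if_pos, Bool.false_eq_true,
        if_neg, not_false_eq_true, ne_eq, reduceCtorEq]
      rw [pv_groupAt_append_start flat ((w :: ws).map PySem.Str.lower) starts hb]
      congr 1
      simp [pvTag, pv_flatten_singleton]

theorem pv_scanB_bound (flat : List String) (starts : List Nat) (seg : String)
    (hb : ∀ s ∈ starts, s ≤ flat.length) :
    ∀ s ∈ (pvScanB (flat, starts) seg).2, s ≤ (pvScanB (flat, starts) seg).1.length := by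
  intro s hs
  unfold pvScanB at hs ⊢
  cases hw : PySem.Str.split₀ seg with
  | nil =>
    simp only [hw, ne_eq, not_true_eq_false, if_neg, not_false_eq_true] at hs ⊢
    exact hb s hs
  | cons w ws =>
    cases hlow : pvStartsLower (w :: ws) <;> simp [hw, hlow] at hs ⊢
    · rcases hs with hs | hs
      · have := hb s hs; omega
      · omega
    · have := hb s hs; omega

theorem pv_scanB_ne_nil (flat : List String) (starts : List Nat) (seg : String)
    (hs : starts ≠ []) : (pvScanB (flat, starts) seg).2 ≠ [] := by
  unfold pvScanB
  cases hw : PySem.Str.split₀ seg with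
  | nil => simpa using hs
  | cons w ws => cases hlow : pvStartsLower (w :: ws) <;> simp [hw, hlow, hs]

-- the fold: A's mat follows B's (flat, starts) state; the pvFirstOK hypothesis rules out
-- the mat[-1]-on-empty path that Pre_ excludes
theorem pv_fold_comm (segs : List String) (flat : List String) (starts : List Nat)
    (hb : ∀ s ∈ starts, s ≤ flat.length)
    (hF : starts = [] → pvFirstOK segs = true) :
    segs.foldl pvStepA (pvGroupAt flat starts) =
      pvGroupAt (segs.foldl pvScanB (flat, starts)).1 (segs.foldl pvScanB (flat, starts)).2 := by
  induction segs generalizing flat starts with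
  | nil => simp
  | cons s rest ih =>
    simp only [List.foldl_cons]
    have hcond : starts ≠ [] ∨ pvStartsLower (PySem.Str.split₀ s) = false := by
      by_cases hs : starts = []
      · right
        have hok := hF hs
        cases hw : PySem.Str.split₀ s with
        | nil => decide
        | cons w ws =>
          simp only [pvFirstOK, hw] at hok
          simpa using hok
      · exact Or.inl hs
    rw [pv_step_comm flat starts s hb hcond]
    have hscan : pvScanB (flat, starts) s =
        ((pvScanB (flat, starts) s).1, (pvScanB (flat, starts) s).2) := rfl
    rw [hscan]
    refine ih _ _ (pv_scanB_bound flat starts s hb) (fun he => ?_)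
    by_cases hs : starts = []
    · subst hs
      have hok := hF rfl
      cases hw : PySem.Str.split₀ s with
      | nil =>
        simp only [pvFirstOK, hw] at hok
        exact hok
      | cons w ws =>
        exfalso
        have hlow : pvStartsLower (w :: ws) = false := by
          simp only [pvFirstOK, hw] at hok; simpa using hok
        have : (pvScanB (flat, ([] : List Nat)) s).2 ≠ [] := by
          simp [pvScanB, hw, hlow]
        exact absurd he this
    · exact absurd he (pv_scanB_ne_nil flat starts s hs)

-- final reconstruction: groupAt equals the zip-of-bounds slicing (B's last pass)
theorem pv_groupAt_eq_slices (flat : List String) (starts : List Nat)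
    (hsort : starts.Pairwise (· ≤ ·)) (hb : ∀ s ∈ starts, s ≤ flat.length) :
    pvGroupAt flat starts =
      ((starts ++ [flat.length]).zip (starts ++ [flat.length]).tail).map
        (fun ab => ["<s>"] ++ PySem.List.slice flat (some (ab.1 : Int)) (some (ab.2 : Int)) ++ ["</s>"]) := by
  induction starts with
  | nil => simp [pvGroupAt]
  | cons a rest ih =>
    match rest with
    | [] =>
      have ha : a ≤ flat.length := hb a (by simp)
      simp only [pvGroupAt, List.cons_append, List.nil_append, List.tail_cons,
        List.zip_cons_cons, List.zip_nil_right, List.map_cons, List.map_nil]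
      rw [PySem.List.slice_natCast]
      rw [List.take_of_length_le (by simp)]
      rfl
    | b :: rest' =>
      simp only [pvGroupAt, List.cons_append, List.tail_cons, List.zip_cons_cons, List.map_cons]
      rw [ih (hsort.sublist (by simp)) (fun s hs => hb s (by simp [hs]))]
      rw [PySem.List.slice_natCast]
      rfl

theorem pv_foldl_foldl_flatMap {α β γ : Type} (g : α → List β) (f : γ → β → γ)
    (l : List α) (init : γ) :
    l.foldl (fun a x => (g x).foldl f a) init = (l.flatMap g).foldl f init := by
  induction l generalizing init with
  | nil => simp
  | cons x xs ih => simp [List.foldl_append, ih]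

theorem pv_lineA_eq (mat : List (List String)) (line : String) :
    pvLineA mat line = ((PySem.Str.split? line ".").getD []).foldl pvStepA mat := by
  unfold pvLineA
  exact PySem.List.foldl_pyRange_zero_pyGetD' _ "" pvStepA mat

theorem pv_find_iff (t : String) :
    (PySem.Str.find t "." = -1) ↔ (PySem.Str.isIn "." t = false) := by
  rw [PySem.Str.find_eq_neg_one_iff]
  constructor
  · intro hni
    cases hx : PySem.Str.isIn "." t
    · rfl
    · exact absurd ((PySem.Str.isIn_iff_infix _ _).mp hx) hni
  · intro hf hinf
    rw [(PySem.Str.isIn_iff_infix _ _).mpr hinf] at hf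
    cases hf

-- sortedness of the recorded starts (needed only for the final slicing pass)
theorem pv_scanB_sorted (flat : List String) (starts : List Nat) (seg : String)
    (hb : ∀ s ∈ starts, s ≤ flat.length) (hsort : starts.Pairwise (· ≤ ·)) :
    (pvScanB (flat, starts) seg).2.Pairwise (· ≤ ·) := by
  unfold pvScanB
  cases hw : PySem.Str.split₀ seg with
  | nil => simpa using hsort
  | cons w ws =>
    cases hlow : pvStartsLower (w :: ws)
    · simp only [hw, hlow, ne_eq, reduceCtorEq, not_false_eq_true, if_pos, if_true]
      exact List.pairwise_append.mpr ⟨hsort, by simp, by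
        intro x hx y hy
        simp at hy
        subst hy
        exact hb x hx⟩
    · simpa [hw, hlow] using hsort

theorem pv_fold_scan_inv (segs : List String) (flat : List String) (starts : List Nat)
    (hb : ∀ s ∈ starts, s ≤ flat.length) (hsort : starts.Pairwise (· ≤ ·)) :
    (∀ s ∈ (segs.foldl pvScanB (flat, starts)).2, s ≤ (segs.foldl pvScanB (flat, starts)).1.length)
      ∧ (segs.foldl pvScanB (flat, starts)).2.Pairwise (· ≤ ·) := by
  induction segs generalizing flat starts with
  | nil => exact ⟨hb, hsort⟩
  | cons s rest ih =>
    simp only [List.foldl_cons]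
    have hscan : pvScanB (flat, starts) s =
        ((pvScanB (flat, starts) s).1, (pvScanB (flat, starts) s).2) := rfl
    rw [hscan]
    exact ih _ _ (pv_scanB_bound flat starts s hb) (pv_scanB_sorted flat starts s hb hsort)

-- ===== VERDICT (by name: the statement is the Claim_ definition above) =====
set_option maxRecDepth 8000 in
set_option maxHeartbeats 1000000 in
theorem split_by_sentence_spec : Claim_equal_split_by_sentence := by
  intro text _ pre
  unfold Spec_split_by_sentence
  cases text with
  | none => rfl
  | some t0 =>
    simp only [split_by_sentence, split_by_sentence_alt]
    by_cases hg : pvClean t0 = "" ∨ PySem.Str.find (pvClean t0) "." = -1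
    · have hg' : pvClean t0 = "" ∨ PySem.Str.isIn "." (pvClean t0) = false := by
        rcases hg with h1 | h2
        · exact Or.inl h1
        · exact Or.inr ((pv_find_iff _).mp h2)
      rw [if_pos hg, if_pos hg']
    · have hg' : ¬(pvClean t0 = "" ∨ PySem.Str.isIn "." (pvClean t0) = false) := by
        intro hc
        rcases hc with h1 | h2
        · exact hg (Or.inl h1)
        · exact hg (Or.inr ((pv_find_iff _).mpr h2))
      rw [if_neg hg, if_neg hg']
      have hg1 : pvClean t0 ≠ "" := fun h => hg (Or.inl h)
      have hg2 : PySem.Str.find (pvClean t0) "." ≠ -1 := fun h => hg (Or.inr h)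
      have pre' : pvFirstOK (pvSegsAll t0) = true := by
        have hp : ((pvClean t0 == "") || (PySem.Str.find (pvClean t0) "." == -1)
            || pvFirstOK (pvSegsAll t0)) = true := pre
        rcases Bool.or_eq_true _ _ |>.mp hp with h | h
        · rcases Bool.or_eq_true _ _ |>.mp h with h1 | h2
          · exact absurd (beq_iff_eq.mp h1) hg1
          · exact absurd (beq_iff_eq.mp h2) hg2
        · exact h
      set lines := (PySem.Str.split? (pvPrep (pvClean t0)) "\n").getD [] with hlines
      have hAr : (PySem.List.pyRange 0 (lines.length : Int)).foldl
          (fun mat ind => pvLineA mat (PySem.List.pyGetD lines ind "")) [] =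
          lines.foldl pvLineA [] :=
        PySem.List.foldl_pyRange_zero_pyGetD' lines "" pvLineA []
      rw [hAr]
      have hlamb : pvLineA = fun (a : List (List String)) (x : String) =>
          ((PySem.Str.split? x ".").getD []).foldl pvStepA a := by
        funext a x; exact pv_lineA_eq a x
      rw [hlamb, pv_foldl_foldl_flatMap]
      have hlambB : (fun (acc : List String × List Nat) (line : String) =>
          ((PySem.Str.split? line ".").getD []).foldl pvScanB acc) =
          fun acc line => ((fun l => (PySem.Str.split? l ".").getD []) line).foldl pvScanB acc := rfl
      rw [hlambB, pv_foldl_foldl_flatMap]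
      set segs := lines.flatMap (fun line => (PySem.Str.split? line ".").getD []) with hsegs
      have hsegs' : segs = pvSegsAll t0 := rfl
      have hmain := pv_fold_comm segs [] [] (by simp) (fun _ => hsegs' ▸ pre')
      have hinv := pv_fold_scan_inv segs [] [] (by simp) (by simp)
      rw [show pvGroupAt [] [] = ([] : List (List String)) from rfl] at hmain
      rw [hmain]
      rw [pv_groupAt_eq_slices _ _ hinv.2 hinv.1]
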